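-- pv_equiv track=rewrite | github.com/Zuhye/PythonAlgorithm | 프로그래머스/test.py | find_max_candidates
-- ===== SOURCE A (Python) =====
-- def find_max_candidates(a):
--     # 서버 1과 서버 2에 대해 각각의 후보군을 시간 기준으로 정렬
--     a.sort(key=lambda x: x[0])  # 서버 1 기준 정렬
--     server1_candidates = [x[0] for x in a]
--     a.sort(key=lambda x: x[1])  # 서버 2 기준 정렬
--     server2_candidates = [x[1] for x in a]
--
--     # 주어진 조건을 만족하는 최대 길이의 후보군을 찾는 함수
--     def max_length(arr):
--         max_len = 0
--         for i in range(len(arr)):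
--             for j in range(i, len(arr)):
--                 if arr[j] > arr[i] * 2 or arr[j] - arr[i] >= 1000:
--                     break
--                 max_len = max(max_len, j - i + 1)
--         return max_len
--
--     # 각 서버별로 조건을 만족하는 최대 후보군 길이를 찾음
--     max_len1 = max_length(server1_candidates)
--     max_len2 = max_length(server2_candidates)
--
--     # 더 많은 후보를 포함할 수 있는 서버와 그 때의 후보의 수 반환
--     if max_len1 > max_len2:
--         return 1, max_len1
--     else:
--         return 2, max_len2
-- ===== SOURCE B (Python) =====
-- def find_max_candidates(a):
--     # Return-value equivalent to A; unlike A it does not mutate `a`.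
--     s1 = sorted(x for x, _ in a)
--     s2 = sorted(y for _, y in a)
--
--     def max_length(arr):
--         best = 0
--         l = 0
--         for r, x in enumerate(arr):
--             while l <= r and (x > 2 * arr[l] or x - arr[l] >= 1000):
--                 l += 1
--             if r + 1 - l > best:
--                 best = r + 1 - l
--         return best
--
--     m1 = max_length(s1)
--     m2 = max_length(s2)
--     return (1, m1) if m1 > m2 else (2, m2)
-- ===== Notes on version B (the rewrite author's own statement) =====
-- stated objective: faster
-- what changed: Replaces the O(n^2) nested scan (restarting j at every i) with a single pass per sorted array that keeps a left window pointer which only ever advances, exploiting monotonicity of the admissibility condition on a sorted array.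
import Mathlib
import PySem

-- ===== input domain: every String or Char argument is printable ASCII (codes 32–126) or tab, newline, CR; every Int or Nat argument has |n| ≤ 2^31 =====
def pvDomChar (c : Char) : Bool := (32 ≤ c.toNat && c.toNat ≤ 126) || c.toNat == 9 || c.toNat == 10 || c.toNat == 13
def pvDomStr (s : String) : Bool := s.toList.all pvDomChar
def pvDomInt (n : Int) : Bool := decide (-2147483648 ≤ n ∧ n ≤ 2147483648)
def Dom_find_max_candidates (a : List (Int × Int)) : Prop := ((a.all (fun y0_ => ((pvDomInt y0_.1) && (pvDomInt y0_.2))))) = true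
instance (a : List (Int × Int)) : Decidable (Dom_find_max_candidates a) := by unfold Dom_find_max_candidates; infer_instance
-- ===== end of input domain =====

-- B replaces A's O(n^2) restarting inner scan by a single left-to-right pass per sorted
-- array that only advances a left window pointer; equivalence is about the RETURN value
-- only: A sorts its argument in place, B does not mutate it.

-- ===== PORT A =====
-- inner 'for j in range(i, len(arr)): if …: break; max_len = max(…)'
def pvAInner (arr : List Int) (ai : Int) (i j : Nat) (maxLen : Nat) : Nat :=
  if h : j < arr.length then
    if arr[j] > ai * 2 ∨ arr[j] - ai ≥ 1000 then maxLen
    else pvAInner arr ai i (j + 1) (max maxLen (j - i + 1))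
  else maxLen
termination_by arr.length - j

-- outer 'for i in range(len(arr))'
def pvAOuter (arr : List Int) (i : Nat) (maxLen : Nat) : Nat :=
  if h : i < arr.length then pvAOuter arr (i + 1) (pvAInner arr arr[i] i i maxLen)
  else maxLen
termination_by arr.length - i

def pvAMaxLength (arr : List Int) : Nat := pvAOuter arr 0 0

def find_max_candidates (a : List (Int × Int)) : List Int :=
  let a1 := PySem.List.sorted a (fun x => x.1) false
  let server1 := a1.map (fun x => x.1)
  let a2 := PySem.List.sorted a1 (fun x => x.2) false
  let server2 := a2.map (fun x => x.2)
  let m1 := pvAMaxLength server1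
  let m2 := pvAMaxLength server2
  if m1 > m2 then [1, (m1 : Int)] else [2, (m2 : Int)]

-- ===== PORT B =====
-- 'while l <= r and (x > 2 * arr[l] or x - arr[l] >= 1000): l += 1'
def pvBShrink (arr : List Int) (x : Int) (r l : Nat) : Nat :=
  if h : l ≤ r ∧ (x > 2 * arr.getD l 0 ∨ x - arr.getD l 0 ≥ 1000) then
    pvBShrink arr x r (l + 1)
  else l
termination_by r + 1 - l
decreasing_by omega

-- one iteration of 'for r, x in enumerate(arr)': state = (r, l, best)
def pvBStep (arr : List Int) (st : Nat × Nat × Nat) (x : Int) : Nat × Nat × Nat :=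
  let l := pvBShrink arr x st.1 st.2.1
  (st.1 + 1, l, if st.1 + 1 - l > st.2.2 then st.1 + 1 - l else st.2.2)

def pvBMaxLength (arr : List Int) : Nat := (arr.foldl (pvBStep arr) (0, 0, 0)).2.2

def find_max_candidates_alt (a : List (Int × Int)) : List Int :=
  let s1 := PySem.List.sorted (a.map (fun x => x.1)) (fun x => x) false
  let s2 := PySem.List.sorted (a.map (fun x => x.2)) (fun x => x) false
  let m1 := pvBMaxLength s1
  let m2 := pvBMaxLength s2
  if m1 > m2 then [1, (m1 : Int)] else [2, (m2 : Int)]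

-- ===== PRECONDITION & SPEC =====
def Spec_find_max_candidates (a : List (Int × Int)) (out : List Int) : Prop := out = find_max_candidates_alt a
instance (a : List (Int × Int)) (out : List Int) : Decidable (Spec_find_max_candidates a out) := by unfold Spec_find_max_candidates; infer_instance

-- ===== CLAIM (what is proved, stated in full; the proofs are below) =====
def Claim_equal_find_max_candidates : Prop := ∀ (a : List (Int × Int)), Dom_find_max_candidates a → Spec_find_max_candidates a (find_max_candidates a)

-- ===== LEMMAS AND PROOFS =====

-- the window predicate both programs test (each tests its negation at its exit)
def pvP (v x : Int) : Bool := decide (x ≤ 2 * v ∧ x - v < 1000)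

-- endpoint form: window [k, r] is admissible
def pvPi (arr : List Int) (k r : Nat) : Bool := pvP (arr.getD k 0) (arr.getD r 0)

-- length of the admissible window starting at i (A's inner scan)
def pvT (arr : List Int) (i : Nat) : Nat :=
  ((arr.drop i).takeWhile (fun x => pvP (arr.getD i 0) x)).length

-- max of pvT over positions i, i+1, …
def pvM (arr : List Int) (i : Nat) : Nat :=
  if i < arr.length then max (pvT arr i) (pvM arr (i + 1)) else 0
termination_by arr.length - i

-- B's left pointer after processing index r, and the window length there
def pvL (arr : List Int) (r : Nat) : Nat := pvBShrink arr (arr.getD r 0) r 0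
def pvW (arr : List Int) (r : Nat) : Nat := r + 1 - pvL arr r

-- max of pvW over positions r, r+1, …
def pvN (arr : List Int) (r : Nat) : Nat :=
  if r < arr.length then max (pvW arr r) (pvN arr (r + 1)) else 0
termination_by arr.length - r

theorem pv_tw_getD {p : Int → Bool} {l : List Int} {k : Nat} (d : Int)
    (hk : k < (l.takeWhile p).length) : p (l.getD k d) = true := by
  induction l generalizing k with
  | nil => simp [List.takeWhile] at hk
  | cons x t ih =>
    by_cases hx : p x
    · cases k with
      | zero => simpa using hx
      | succ k => simp [List.takeWhile, hx] at hk ⊢; exact ih hk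
    · simp [List.takeWhile, hx] at hk

theorem pv_tw_ge {p : Int → Bool} {l : List Int} {m : Nat} (d : Int)
    (hm : m ≤ l.length) (h : ∀ k, k < m → p (l.getD k d) = true) :
    m ≤ (l.takeWhile p).length := by
  induction l generalizing m with
  | nil => simpa using hm
  | cons x t ih =>
    cases m with
    | zero => simp
    | succ m =>
      have hx : p x = true := by simpa using h 0 (Nat.succ_pos m)
      simp only [List.takeWhile, hx, List.length_cons]
      have := ih (m := m) (by simpa using hm) (fun k hk => by simpa using h (k + 1) (by omega))
      omega

theorem pv_getD_drop (l : List Int) (i j : Nat) (d : Int) :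
    (l.drop i).getD j d = l.getD (i + j) d := by
  simp [List.getD, List.getElem?_drop]

theorem pv_t_le (arr : List Int) (i : Nat) : pvT arr i ≤ arr.length - i := by
  have := (List.takeWhile_sublist (p := fun x => pvP (arr.getD i 0) x) (l := arr.drop i)).length_le
  simp only [List.length_drop] at this
  simpa [pvT] using this

-- pvP is antitone in its second argument
theorem pvP_anti {v x x' : Int} (hx : x' ≤ x) (h : pvP v x = true) : pvP v x' = true := by
  simp only [pvP, decide_eq_true_eq] at h ⊢; omega

-- sorted arrays: getD is monotone on in-range indices
theorem pv_sorted_getD (arr : List Int) (hs : arr.Pairwise (· ≤ ·)) {k r : Nat}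
    (hkr : k ≤ r) (hr : r < arr.length) : arr.getD k 0 ≤ arr.getD r 0 := by
  rcases Nat.lt_or_ge k r with h | h
  · rw [List.getD_eq_getElem arr 0 (by omega), List.getD_eq_getElem arr 0 hr]
    exact List.pairwise_iff_getElem.mp hs k r (by omega) hr h
  · have : k = r := by omega
    rw [this]

-- ===== A-side: pvAMaxLength = pvM =====

theorem pvAInner_eq (arr : List Int) (ai : Int) (i : Nat) :
    ∀ j maxLen, i ≤ j →
      pvAInner arr ai i j maxLen =
        max maxLen (if ((arr.drop j).takeWhile (fun x => pvP ai x)).length = 0 then 0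
                    else j - i + ((arr.drop j).takeWhile (fun x => pvP ai x)).length) := by
  intro j maxLen hij
  induction hn : arr.length - j using Nat.strong_induction_on generalizing j maxLen with
  | _ n ih =>
  subst hn
  rw [pvAInner]
  by_cases hj : j < arr.length
  · have hdrop : arr.drop j = arr[j] :: arr.drop (j + 1) := List.drop_eq_getElem_cons hj
    by_cases hg : arr[j] > ai * 2 ∨ arr[j] - ai ≥ 1000
    · have hp : pvP ai arr[j] = false := by
        simp only [pvP, decide_eq_false_iff_not]; intro ⟨h1, h2⟩; rcases hg with hg | hg <;> omega
      rw [dif_pos hj, if_pos hg, hdrop]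
      simp [List.takeWhile, hp]
    · have hp : pvP ai arr[j] = true := by
        simp only [pvP, decide_eq_true_eq]; constructor <;> omega
      rw [dif_pos hj, if_neg hg,
        ih (arr.length - (j + 1)) (by omega) (j + 1) (max maxLen (j - i + 1)) (by omega) rfl]
      rw [hdrop]
      simp only [List.takeWhile, hp, List.length_cons]
      by_cases h0 : ((arr.drop (j + 1)).takeWhile (fun x => pvP ai x)).length = 0
      · rw [if_pos h0, if_neg (Nat.succ_ne_zero _)]
        omega
      · rw [if_neg h0, if_neg (Nat.succ_ne_zero _)]
        omega
  · have hnil : arr.drop j = [] := List.drop_eq_nil_of_le (by omega)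
    rw [dif_neg hj, hnil]
    simp

theorem pvAOuter_eq (arr : List Int) :
    ∀ i maxLen, pvAOuter arr i maxLen = max maxLen (pvM arr i) := by
  intro i maxLen
  induction hn : arr.length - i using Nat.strong_induction_on generalizing i maxLen with
  | _ n ih =>
  subst hn
  rw [pvAOuter, pvM]
  by_cases hi : i < arr.length
  · have h1 : pvAInner arr arr[i] i i maxLen = max maxLen (pvT arr i) := by
      rw [pvAInner_eq arr arr[i] i i maxLen (le_refl i)]
      have hg : arr.getD i 0 = arr[i] := List.getD_eq_getElem arr 0 hi
      simp only [pvT, hg]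
      rcases Nat.eq_zero_or_pos ((arr.drop i).takeWhile (fun x => pvP arr[i] x)).length with h0 | h0
      · simp [h0]
      · rw [if_neg (by omega)]; omega
    rw [dif_pos hi, if_pos hi, h1,
      ih (arr.length - (i + 1)) (by omega) (i + 1) _ rfl]
    omega
  · rw [dif_neg hi, if_neg hi]
    simp

-- ===== B-side: shrink characterization =====

-- the shrink loop's result: bounds, stop condition, and failure of everything skipped
theorem pvBShrink_spec (arr : List Int) (x : Int) (r : Nat) :
    ∀ l, l ≤ r + 1 →
      l ≤ pvBShrink arr x r l ∧ pvBShrink arr x r l ≤ r + 1 ∧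
      (pvBShrink arr x r l ≤ r → pvP (arr.getD (pvBShrink arr x r l) 0) x = true) ∧
      (∀ k, l ≤ k → k < pvBShrink arr x r l → pvP (arr.getD k 0) x = false) := by
  intro l hl
  induction hn : r + 1 - l using Nat.strong_induction_on generalizing l with
  | _ n ih =>
  subst hn
  rw [pvBShrink]
  by_cases h : l ≤ r ∧ (x > 2 * arr.getD l 0 ∨ x - arr.getD l 0 ≥ 1000)
  · rw [dif_pos h]
    obtain ⟨h1, h2, h3, h4⟩ := ih (r + 1 - (l + 1)) (by omega) (l + 1) (by omega) rfl
    refine ⟨by omega, h2, h3, ?_⟩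
    intro k hk1 hk2
    rcases Nat.lt_or_ge k (l + 1) with hkl | hkl
    · have : k = l := by omega
      subst this
      simp only [pvP, decide_eq_false_iff_not]; intro ⟨c1, c2⟩; rcases h.2 with hg | hg <;> omega
    · exact h4 k hkl hk2
  · rw [dif_neg h]
    refine ⟨le_refl l, hl, ?_, by omega⟩
    intro hlr
    rcases not_and_or.mp h with h' | h'
    · omega
    · simp only [pvP, decide_eq_true_eq]
      push_neg at h'
      omega

-- one failing step of the shrink loop
theorem pvBShrink_step (arr : List Int) (x : Int) (r m : Nat) (hm : m ≤ r)
    (hpm : pvP (arr.getD m 0) x = false) :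
    pvBShrink arr x r m = pvBShrink arr x r (m + 1) := by
  have hg : x > 2 * arr.getD m 0 ∨ x - arr.getD m 0 ≥ 1000 := by
    simp only [pvP, decide_eq_false_iff_not] at hpm
    omega
  conv_lhs => rw [pvBShrink]
  rw [dif_pos ⟨hm, hg⟩]

-- skipping an already-failed prefix does not change the shrink result
theorem pvBShrink_skip (arr : List Int) (x : Int) (r : Nat) :
    ∀ l, l ≤ r + 1 → (∀ k, k < l → pvP (arr.getD k 0) x = false) →
      pvBShrink arr x r l = pvBShrink arr x r 0 := by
  intro l hl hfail
  induction l with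
  | zero => rfl
  | succ m ih =>
    rw [← pvBShrink_step arr x r m (by omega) (hfail m (by omega))]
    exact ih (by omega) (fun k hk => hfail k (by omega))

theorem pvL_le (arr : List Int) (r : Nat) : pvL arr r ≤ r + 1 :=
  (pvBShrink_spec arr (arr.getD r 0) r 0 (by omega)).2.1

theorem pvL_stop (arr : List Int) (r : Nat) (h : pvL arr r ≤ r) :
    pvPi arr (pvL arr r) r = true :=
  (pvBShrink_spec arr (arr.getD r 0) r 0 (by omega)).2.2.1 h

theorem pvL_fail (arr : List Int) (r : Nat) {k : Nat} (h : k < pvL arr r) :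
    pvPi arr k r = false :=
  (pvBShrink_spec arr (arr.getD r 0) r 0 (by omega)).2.2.2 k (by omega) h

-- failure persists to later right endpoints on a sorted array
theorem pv_fail_mono (arr : List Int) (hs : arr.Pairwise (· ≤ ·)) {k r r' : Nat}
    (hr : r ≤ r') (hr' : r' < arr.length) (h : pvPi arr k r = false) :
    pvPi arr k r' = false := by
  by_contra hcon
  have h2 : pvPi arr k r' = true := by
    revert hcon; cases (pvPi arr k r') <;> simp
  have h3 : pvPi arr k r = true := by
    simp only [pvPi] at h2 ⊢
    exact pvP_anti (pv_sorted_getD arr hs hr hr') h2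
  rw [h] at h3
  exact Bool.noConfusion h3

-- the fold over the suffix: B's best accumulates max over pvW
theorem pvBFold_eq (arr : List Int) (hs : arr.Pairwise (· ≤ ·)) :
    ∀ r l best, l ≤ r →
      (∀ k, k < l → ∀ r', r ≤ r' → r' < arr.length → pvPi arr k r' = false) →
      ((arr.drop r).foldl (pvBStep arr) (r, l, best)).2.2 = max best (pvN arr r) := by
  intro r l best hl hinv
  induction hd : arr.drop r generalizing r l best with
  | nil =>
    have hr : ¬ r < arr.length := by
      have := congrArg List.length hd
      simp only [List.length_drop, List.length_nil] at this
      omega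
    rw [List.foldl_nil, pvN, if_neg hr]
    simp
  | cons x t ih =>
    have hr : r < arr.length := by
      have := congrArg List.length hd
      simp only [List.length_drop, List.length_cons] at this
      omega
    have hcons : arr.drop r = arr[r] :: arr.drop (r + 1) := List.drop_eq_getElem_cons hr
    rw [hd] at hcons
    have hx : x = arr.getD r 0 := by
      rw [List.getD_eq_getElem arr 0 hr]
      exact (List.cons.injEq _ _ _ _ ▸ hcons).1
    have ht : arr.drop (r + 1) = t := ((List.cons.injEq _ _ _ _ ▸ hcons).2).symm
    have hshr : pvBShrink arr x r l = pvL arr r := by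
      rw [hx]
      exact pvBShrink_skip arr (arr.getD r 0) r l (by omega)
        (fun k hk => hinv k hk r (le_refl r) hr)
    have hstep : pvBStep arr (r, l, best) x =
        (r + 1, pvL arr r, max best (pvW arr r)) := by
      simp only [pvBStep, hshr, pvW]
      congr 1
      congr 1
      split <;> omega
    rw [List.foldl_cons, hstep]
    have hinv' : ∀ k, k < pvL arr r → ∀ r', r + 1 ≤ r' → r' < arr.length → pvPi arr k r' = false := by
      intro k hk r' hr1 hr2
      exact pv_fail_mono arr hs (by omega) hr2 (pvL_fail arr r hk)
    have hN : pvN arr r = max (pvW arr r) (pvN arr (r + 1)) := by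
      conv_lhs => rw [pvN]
      rw [if_pos hr]
    rw [ih (r + 1) (pvL arr r) (max best (pvW arr r)) (pvL_le arr r) hinv' ht, hN]
    omega

theorem pvBMaxLength_eq (arr : List Int) (hs : arr.Pairwise (· ≤ ·)) :
    pvBMaxLength arr = pvN arr 0 := by
  have := pvBFold_eq arr hs 0 0 0 (by omega) (by omega)
  simpa [pvBMaxLength] using this

-- ===== bridging pvM and pvN on sorted arrays =====

theorem pvT_le_pvM (arr : List Int) {i0 i : Nat} (h0 : i0 ≤ i) (hi : i < arr.length) :
    pvT arr i ≤ pvM arr i0 := by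
  induction hn : i - i0 using Nat.strong_induction_on generalizing i0 with
  | _ n ih =>
  subst hn
  rw [pvM, if_pos (by omega)]
  rcases Nat.eq_or_lt_of_le h0 with he | hlt
  · subst he; omega
  · have := ih (i - (i0 + 1)) (by omega) (by omega) rfl
    omega

theorem pvM_le (arr : List Int) (B : Nat) :
    ∀ i0, (∀ i, i0 ≤ i → i < arr.length → pvT arr i ≤ B) → pvM arr i0 ≤ B := by
  intro i0 h
  induction hn : arr.length - i0 using Nat.strong_induction_on generalizing i0 with
  | _ n ih =>
  subst hn
  rw [pvM]
  by_cases hi : i0 < arr.length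
  · rw [if_pos hi]
    have h1 := h i0 (le_refl i0) hi
    have h2 := ih (arr.length - (i0 + 1)) (by omega) (i0 + 1)
      (fun i hi1 hi2 => h i (by omega) hi2) rfl
    omega
  · rw [if_neg hi]; omega

theorem pvW_le_pvN (arr : List Int) {r0 r : Nat} (h0 : r0 ≤ r) (hr : r < arr.length) :
    pvW arr r ≤ pvN arr r0 := by
  induction hn : r - r0 using Nat.strong_induction_on generalizing r0 with
  | _ n ih =>
  subst hn
  rw [pvN, if_pos (by omega)]
  rcases Nat.eq_or_lt_of_le h0 with he | hlt
  · subst he; omega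
  · have := ih (r - (r0 + 1)) (by omega) (by omega) rfl
    omega

theorem pvN_le (arr : List Int) (B : Nat) :
    ∀ r0, (∀ r, r0 ≤ r → r < arr.length → pvW arr r ≤ B) → pvN arr r0 ≤ B := by
  intro r0 h
  induction hn : arr.length - r0 using Nat.strong_induction_on generalizing r0 with
  | _ n ih =>
  subst hn
  rw [pvN]
  by_cases hr : r0 < arr.length
  · rw [if_pos hr]
    have h1 := h r0 (le_refl r0) hr
    have h2 := ih (arr.length - (r0 + 1)) (by omega) (r0 + 1)
      (fun r hr1 hr2 => h r (by omega) hr2) rfl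
    omega
  · rw [if_neg hr]; omega

-- each B window fits inside A's scan from its left end
theorem pvW_le_pvT (arr : List Int) (hs : arr.Pairwise (· ≤ ·)) {r : Nat}
    (hr : r < arr.length) (hpos : pvL arr r ≤ r) :
    pvW arr r ≤ pvT arr (pvL arr r) := by
  set L := pvL arr r with hL
  have hstop : pvPi arr L r = true := pvL_stop arr r hpos
  have : r - L + 1 ≤ pvT arr L := by
    apply pv_tw_ge (d := 0)
    · simp only [List.length_drop]; omega
    · intro k hk
      rw [pv_getD_drop]
      have hlk : arr.getD (L + k) 0 ≤ arr.getD r 0 := pv_sorted_getD arr hs (by omega) hr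
      exact pvP_anti hlk hstop
  simp only [pvW]
  omega

-- each A scan fits inside B's window at its right end
theorem pvT_le_pvW (arr : List Int) {i : Nat} (hi : i < arr.length) (hpos : 1 ≤ pvT arr i) :
    pvT arr i ≤ pvW arr (i + pvT arr i - 1) := by
  set r := i + pvT arr i - 1 with hrdef
  have htle : pvT arr i ≤ arr.length - i := pv_t_le arr i
  have hp : pvPi arr i r = true := by
    have := pv_tw_getD (p := fun x => pvP (arr.getD i 0) x) (l := arr.drop i)
      (k := pvT arr i - 1) 0 (by simp only [pvT] at *; omega)
    rw [pv_getD_drop] at this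
    have he : i + (pvT arr i - 1) = r := by omega
    rw [he] at this
    exact this
  have hLle : pvL arr r ≤ i := by
    by_contra hcon
    push_neg at hcon
    have hf := pvL_fail arr r hcon
    rw [hf] at hp
    exact Bool.noConfusion hp
  simp only [pvW]
  omega

theorem pvM_eq_pvN (arr : List Int) (hs : arr.Pairwise (· ≤ ·)) :
    pvM arr 0 = pvN arr 0 := by
  apply Nat.le_antisymm
  · apply pvM_le
    intro i _ hi
    rcases Nat.eq_zero_or_pos (pvT arr i) with h0 | h0
    · omega
    · have hr : i + pvT arr i - 1 < arr.length := by
        have := pv_t_le arr i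
        omega
      exact le_trans (pvT_le_pvW arr hi h0) (pvW_le_pvN arr (by omega) hr)
  · apply pvN_le
    intro r _ hr
    rcases Nat.lt_or_ge r (pvL arr r) with h0 | h0
    · simp only [pvW]; omega
    · have hLlt : pvL arr r < arr.length := by omega
      exact le_trans (pvW_le_pvT arr hs hr h0) (pvT_le_pvM arr (by omega) hLlt)

theorem pv_maxlen_eq (arr : List Int) (hs : arr.Pairwise (· ≤ ·)) :
    pvAMaxLength arr = pvBMaxLength arr := by
  rw [pvAMaxLength, pvAOuter_eq, pvBMaxLength_eq arr hs, ← pvM_eq_pvN arr hs]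
  omega

-- sorting pairs by a key then projecting the key = sorting the projected keys
theorem pv_map_sorted_key (a : List (Int × Int)) (key : Int × Int → Int)
    (b : List (Int × Int)) (hperm : b.Perm a) :
    (PySem.List.sorted b key false).map key =
      PySem.List.sorted (a.map key) (fun x => x) false := by
  refine List.Perm.eq_of_pairwise' (r := (· ≤ · : Int → Int → Prop)) ?_ ?_ ?_
  · exact PySem.List.sorted_map_key_pairwise b key
  · simpa using PySem.List.sorted_pairwise (a.map key) (fun x => x)
  · exact ((PySem.List.sorted_perm b key false).map key).trans
      ((hperm.map key).trans ((PySem.List.sorted_perm (a.map key) (fun x => x) false).symm))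

-- ===== VERDICT (by name: the statement is the Claim_ definition above) =====
theorem find_max_candidates_spec : Claim_equal_find_max_candidates := by
  intro a _
  unfold Spec_find_max_candidates find_max_candidates find_max_candidates_alt
  have h1 : (PySem.List.sorted a (fun x => x.1) false).map (fun x => x.1) =
      PySem.List.sorted (a.map (fun x => x.1)) (fun x => x) false :=
    pv_map_sorted_key a (fun x => x.1) a (List.Perm.refl a)
  have h2 : (PySem.List.sorted (PySem.List.sorted a (fun x => x.1) false) (fun x => x.2) false).map (fun x => x.2) =
      PySem.List.sorted (a.map (fun x => x.2)) (fun x => x) false :=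
    pv_map_sorted_key a (fun x => x.2) (PySem.List.sorted a (fun x => x.1) false)
      (PySem.List.sorted_perm a (fun x => x.1) false)
  have hs1 : (PySem.List.sorted (a.map (fun x => x.1)) (fun x => x) false).Pairwise (· ≤ ·) := by
    simpa using PySem.List.sorted_pairwise (a.map (fun x => x.1)) (fun x => x)
  have hs2 : (PySem.List.sorted (a.map (fun x => x.2)) (fun x => x) false).Pairwise (· ≤ ·) := by
    simpa using PySem.List.sorted_pairwise (a.map (fun x => x.2)) (fun x => x)
  simp only [h1, h2, pv_maxlen_eq _ hs1, pv_maxlen_eq _ hs2]
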